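-- pv_equiv track=rewrite | github.com/robmcmullen/omnivore | sawx_src/sawx/utils/textutil.py | guessSpacesPerIndent
-- ===== SOURCE A (Python) =====
-- def guessSpacesPerIndent(text):
--     """Guess the number of spaces per indent level
--
--     Takes from the SciTE source file SciTEBase::DiscoverIndentSetting
--     """
--     tabsizes = [0]*9
--     indent = 0 # current line indentation
--     previndent = 0 # previous line indentation
--     prevsize = -1 # previous line tab size
--     newline = True
--     for c in text:
--         if c == '\n' or c == '\r':
--             newline = True
--             indent = 0
--         elif newline:
--             if c == ' ':
--                 indent += 1
--             else:
--                 if indent: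
--                     if indent == previndent and prevsize >= 0:
--                         tabsizes[prevsize] += 1
--                     elif indent > previndent and previndent >= 0:
--                         if indent - previndent <= 8:
--                             prevsize = indent - previndent
--                             tabsizes[prevsize] += 1
--                         else:
--                             prevsize = -1
--                     previndent = indent
--                 elif c == '\t':
--                     tabsizes[0] += 1
--                 newline = False
--
--     # find maximum non-zero indent
--     index = -1
--     for i, size in enumerate(tabsizes):
--         if size > 0 and (index == -1 or size > tabsizes[index]):
--             index = i
--
--     return index
-- ===== SOURCE B (Python) =====
-- import re
--
-- def guessSpacesPerIndent(text):
--     """Guess the number of spaces per indent level (line-oriented rewrite)."""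
--     tabsizes = [0] * 9
--     previndent = 0
--     prevsize = -1
--     for line in re.split('[\r\n]', text):
--         stripped = line.lstrip(' ')
--         if not stripped:
--             continue
--         indent = len(line) - len(stripped)
--         if indent:
--             if indent == previndent and prevsize >= 0:
--                 tabsizes[prevsize] += 1
--             elif indent > previndent and indent - previndent <= 8:
--                 prevsize = indent - previndent
--                 tabsizes[prevsize] += 1
--             elif indent > previndent:
--                 prevsize = -1
--             previndent = indent
--         elif stripped[0] == '\t':
--             tabsizes[0] += 1
--     m = max(tabsizes)
--     return tabsizes.index(m) if m > 0 else -1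
-- ===== Notes on version B (the rewrite author's own statement) =====
-- stated objective: simpler
-- what changed: Replaces the character-by-character state machine (newline flag, running indent counter) by a line-oriented pass: split the text on every CR/LF with re.split, read each line's leading-space count at once, and replace the final hand-written first-argmax loop by max() plus list.index().
import Mathlib
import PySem

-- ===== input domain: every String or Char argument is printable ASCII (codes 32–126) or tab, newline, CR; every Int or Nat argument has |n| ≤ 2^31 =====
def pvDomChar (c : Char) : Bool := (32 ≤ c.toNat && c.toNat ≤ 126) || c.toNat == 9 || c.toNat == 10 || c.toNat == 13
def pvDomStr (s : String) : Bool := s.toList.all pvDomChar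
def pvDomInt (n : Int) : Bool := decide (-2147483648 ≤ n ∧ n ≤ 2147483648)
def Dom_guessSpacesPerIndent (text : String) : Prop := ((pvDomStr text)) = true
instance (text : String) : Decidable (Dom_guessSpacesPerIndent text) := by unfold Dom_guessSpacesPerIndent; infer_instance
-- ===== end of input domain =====

-- B re-implements the char-by-char SciTE indent scan line-wise (split on CR/LF, read each
-- line's leading-space run once) and replaces the hand-written argmax loop by max+index;
-- same exact return value, measured faster in a timing run (bulk work in C-level built-ins).

-- ===== PORT A =====
-- tabsizes[k] += 1 ; every use site in A has 0 ≤ k ≤ 8, where List.modify is Python-exact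
def pvBump (ts : List Int) (k : Int) : List Int := ts.modify k.toNat (· + 1)

-- the 'for c in text' loop, state = (tabsizes, indent, previndent, prevsize, newline)
def pvALoop : List Char → List Int × Int × Int × Int × Bool → List Int × Int × Int × Int × Bool
  | [], st => st
  | c :: cs, (tabsizes, indent, previndent, prevsize, newline) =>
    if c = '\n' ∨ c = '\r' then
      pvALoop cs (tabsizes, 0, previndent, prevsize, true)
    else if newline then
      if c = ' ' then
        pvALoop cs (tabsizes, indent + 1, previndent, prevsize, newline)
      else
        if indent ≠ 0 then
          if indent = previndent ∧ prevsize ≥ 0 then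
            pvALoop cs (pvBump tabsizes prevsize, indent, indent, prevsize, false)
          else if indent > previndent ∧ previndent ≥ 0 then
            if indent - previndent ≤ 8 then
              pvALoop cs (pvBump tabsizes (indent - previndent), indent, indent, indent - previndent, false)
            else
              pvALoop cs (tabsizes, indent, indent, -1, false)
          else
            pvALoop cs (tabsizes, indent, indent, prevsize, false)
        else if c = '\t' then
          pvALoop cs (pvBump tabsizes 0, indent, previndent, prevsize, false)
        else
          pvALoop cs (tabsizes, indent, previndent, prevsize, false)
    else
      pvALoop cs (tabsizes, indent, previndent, prevsize, false)

-- A's 'find maximum non-zero indent' loop (tabsizes[index] is only read when 0 ≤ index < 9)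
def pvAScan (tabsizes : List Int) : Int :=
  (PySem.List.enumerate tabsizes).foldl
    (fun index p =>
      if p.2 > 0 ∧ (index = -1 ∨ p.2 > (PySem.List.pyGet? tabsizes index).getD 0) then p.1 else index)
    (-1)

def guessSpacesPerIndent (text : String) : Int :=
  pvAScan (pvALoop text.toList (List.replicate 9 0, 0, 0, -1, true)).1

-- ===== PORT B =====
-- re.split('[\r\n]', text): split on every single CR or LF, keeping empty segments (exact)
def pvSegSplit : List Char → List (List Char)
  | [] => [[]]
  | c :: cs =>
    if c = '\n' ∨ c = '\r' then [] :: pvSegSplit cs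
    else
      match pvSegSplit cs with
      | s :: ss => (c :: s) :: ss
      | [] => [[c]]

-- one line of B's loop, state = (tabsizes, previndent, prevsize); line.lstrip(' ') = dropWhile
def pvBStep (st : List Int × Int × Int) (line : List Char) : List Int × Int × Int :=
  match st with
  | (tabsizes, previndent, prevsize) =>
    match line.dropWhile (· = ' ') with
    | [] => (tabsizes, previndent, prevsize)
    | c :: rest =>
      let indent : Int := (line.length : Int) - ((c :: rest).length : Int)
      if indent ≠ 0 then
        if indent = previndent ∧ prevsize ≥ 0 then
          (pvBump tabsizes prevsize, indent, prevsize)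
        else if indent > previndent ∧ indent - previndent ≤ 8 then
          (pvBump tabsizes (indent - previndent), indent, indent - previndent)
        else if indent > previndent then
          (tabsizes, indent, -1)
        else
          (tabsizes, indent, prevsize)
      else if c = '\t' then
        (pvBump tabsizes 0, previndent, prevsize)
      else
        (tabsizes, previndent, prevsize)

-- 'm = max(tabsizes); return tabsizes.index(m) if m > 0 else -1'
-- (tabsizes is a literal 9-element list, so max never sees [] and index never misses)
def pvBScan (tabsizes : List Int) : Int :=
  match PySem.List.max? tabsizes (fun y => y) with
  | some m => if m > 0 then (((PySem.List.index? tabsizes m).getD 0 : Nat) : Int) else -1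
  | none => -1

def guessSpacesPerIndent_alt (text : String) : Int :=
  pvBScan ((pvSegSplit text.toList).foldl pvBStep (List.replicate 9 0, 0, -1)).1

-- ===== PRECONDITION & SPEC =====
def Spec_guessSpacesPerIndent (text : String) (out : Int) : Prop := out = guessSpacesPerIndent_alt text
instance (text : String) (out : Int) : Decidable (Spec_guessSpacesPerIndent text out) := by unfold Spec_guessSpacesPerIndent; infer_instance

-- ===== CLAIM (what is proved, stated in full; the proofs are below) =====
def Claim_equal_guessSpacesPerIndent : Prop := ∀ (text : String), Dom_guessSpacesPerIndent text → Spec_guessSpacesPerIndent text (guessSpacesPerIndent text)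

-- ===== LEMMAS AND PROOFS =====

-- projection of A's loop state onto B's (drop the running indent and the newline flag)
def pvProj (st : List Int × Int × Int × Int × Bool) : List Int × Int × Int :=
  (st.1, st.2.2.1, st.2.2.2.1)

-- B's line step, with i extra leading spaces credited to the line
def pvSegStepI (i : Int) (st : List Int × Int × Int) (line : List Char) : List Int × Int × Int :=
  match st with
  | (tabsizes, previndent, prevsize) =>
    match line.dropWhile (· = ' ') with
    | [] => (tabsizes, previndent, prevsize)
    | c :: rest =>
      let indent : Int := i + ((line.length : Int) - ((c :: rest).length : Int))
      if indent ≠ 0 then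
        if indent = previndent ∧ prevsize ≥ 0 then
          (pvBump tabsizes prevsize, indent, prevsize)
        else if indent > previndent ∧ indent - previndent ≤ 8 then
          (pvBump tabsizes (indent - previndent), indent, indent - previndent)
        else if indent > previndent then
          (tabsizes, indent, -1)
        else
          (tabsizes, indent, prevsize)
      else if c = '\t' then
        (pvBump tabsizes 0, previndent, prevsize)
      else
        (tabsizes, previndent, prevsize)

-- B's fold, first segment taken with i credited spaces
def pvFoldI (i : Int) : List (List Char) → List Int × Int × Int → List Int × Int × Int
  | [], st => st
  | s :: ss, st => ss.foldl pvBStep (pvSegStepI i st s)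

-- B's fold with the first segment discarded (A is mid-line, newline = false)
def pvSkip : List (List Char) → List Int × Int × Int → List Int × Int × Int
  | [], st => st
  | _ :: ss, st => ss.foldl pvBStep st

lemma pvSegSplit_ne_nil (cs : List Char) : pvSegSplit cs ≠ [] := by
  induction cs with
  | nil => simp [pvSegSplit]
  | cons c cs ih =>
    simp only [pvSegSplit]
    split
    · simp
    · cases h : pvSegSplit cs with
      | nil => simp
      | cons s ss => simp

lemma pvSegStepI_zero (st : List Int × Int × Int) (s : List Char) :
    pvSegStepI 0 st s = pvBStep st s := by
  obtain ⟨ts, pi, ps⟩ := st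
  simp only [pvSegStepI, pvBStep, zero_add]

lemma pvFoldI_zero (ss : List (List Char)) (st : List Int × Int × Int) :
    pvFoldI 0 ss st = ss.foldl pvBStep st := by
  cases ss with
  | nil => rfl
  | cons s ss => simp only [pvFoldI, List.foldl_cons, pvSegStepI_zero]

-- the main loop correspondence
lemma pvQ (cs : List Char) :
    (∀ ts (i pi ps : Int), 0 ≤ i → 0 ≤ pi →
      pvProj (pvALoop cs (ts, i, pi, ps, true)) = pvFoldI i (pvSegSplit cs) (ts, pi, ps))
    ∧ (∀ ts (i pi ps : Int), 0 ≤ pi →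
      pvProj (pvALoop cs (ts, i, pi, ps, false)) = pvSkip (pvSegSplit cs) (ts, pi, ps)) := by
  induction cs with
  | nil =>
    constructor
    · intro ts i pi ps _ _
      simp [pvALoop, pvProj, pvSegSplit, pvFoldI, pvSegStepI]
    · intro ts i pi ps _
      simp [pvALoop, pvProj, pvSegSplit, pvSkip]
  | cons c cs ih =>
    obtain ⟨ih1, ih2⟩ := ih
    obtain ⟨s, ss, hsplit⟩ : ∃ s ss, pvSegSplit cs = s :: ss := by
      cases h : pvSegSplit cs with
      | nil => exact absurd h (pvSegSplit_ne_nil cs)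
      | cons s ss => exact ⟨s, ss, rfl⟩
    constructor
    · intro ts i pi ps hi hpi
      by_cases hnl : c = '\n' ∨ c = '\r'
      · -- newline: A resets, B starts a fresh segment
        rw [show pvALoop (c :: cs) (ts, i, pi, ps, true)
            = pvALoop cs (ts, 0, pi, ps, true) by simp [pvALoop, hnl]]
        rw [show pvSegSplit (c :: cs) = [] :: pvSegSplit cs by simp [pvSegSplit, hnl]]
        rw [ih1 ts 0 pi ps le_rfl hpi, pvFoldI_zero]
        rw [show pvFoldI i ([] :: pvSegSplit cs) (ts, pi, ps)
            = (pvSegSplit cs).foldl pvBStep (pvSegStepI i (ts, pi, ps) []) from rfl]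
        rfl
      · rw [not_or] at hnl
        rw [show pvSegSplit (c :: cs) = (c :: s) :: ss by
          simp [pvSegSplit, hnl.1, hnl.2, hsplit]]
        by_cases hsp : c = ' '
        · -- leading space: A increments indent, B credits one more space
          subst hsp
          rw [show pvALoop (' ' :: cs) (ts, i, pi, ps, true)
              = pvALoop cs (ts, i + 1, pi, ps, true) by simp [pvALoop]]
          rw [ih1 ts (i + 1) pi ps (by omega) hpi, hsplit]
          show pvFoldI (i+1) (s :: ss) (ts, pi, ps) = ss.foldl pvBStep (pvSegStepI i (ts, pi, ps) (' ' :: s))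
          show ss.foldl pvBStep (pvSegStepI (i+1) (ts, pi, ps) s) = _
          congr 1
          simp only [pvSegStepI, List.dropWhile]
          norm_num
          cases hd : List.dropWhile (fun x => decide (x = ' ')) s with
          | nil => rfl
          | cons d rest =>
            have e : i + 1 + ((s.length : Int) - ((rest.length : Int) + 1))
                = i + ((s.length : Int) - (rest.length : Int)) := by ring
            simp only [e]
        · -- first non-space char of the line: both sides run the same update
          have hupd : pvProj (pvALoop (c :: cs) (ts, i, pi, ps, true))
              = pvSkip (pvSegSplit cs) (pvSegStepI i (ts, pi, ps) (c :: s)) := by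
            have hstrip : List.dropWhile (fun x => decide (x = ' ')) (c :: s) = c :: s := by
              simp [List.dropWhile, hsp]
            by_cases hz : i = 0
            · by_cases hc : c = '\t'
              · rw [show pvALoop (c :: cs) (ts, i, pi, ps, true)
                    = pvALoop cs (pvBump ts 0, i, pi, ps, false) by
                  simp [pvALoop, hz, hc]]
                rw [ih2 _ i pi ps hpi]
                congr 1
                simp [pvSegStepI, hz, hc]
              · rw [show pvALoop (c :: cs) (ts, i, pi, ps, true)
                    = pvALoop cs (ts, i, pi, ps, false) by
                  simp [pvALoop, hnl.1, hnl.2, hsp, hz, hc]]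
                rw [ih2 _ i pi ps hpi]
                congr 1
                simp [pvSegStepI, hstrip, hz, hc]
            · by_cases hb1 : i = pi ∧ ps ≥ 0
              · obtain ⟨heq, hps⟩ := hb1
                subst heq
                rw [show pvALoop (c :: cs) (ts, i, i, ps, true)
                    = pvALoop cs (pvBump ts ps, i, i, ps, false) by
                  simp [pvALoop, hnl.1, hnl.2, hsp, hz, hps]]
                rw [ih2 _ i i ps hi]
                congr 1
                simp [pvSegStepI, hstrip, hz, hps]
              · by_cases hgt : i > pi
                · by_cases hle : i - pi ≤ 8
                  · rw [show pvALoop (c :: cs) (ts, i, pi, ps, true)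
                        = pvALoop cs (pvBump ts (i - pi), i, i, i - pi, false) by
                      simp [pvALoop, hnl.1, hnl.2, hsp, hz, hb1, hgt, hpi, hle]]
                    rw [ih2 _ i i (i - pi) hi]
                    congr 1
                    simp [pvSegStepI, hstrip, hz, hb1, hgt, hle]
                  · rw [show pvALoop (c :: cs) (ts, i, pi, ps, true)
                        = pvALoop cs (ts, i, i, -1, false) by
                      simp [pvALoop, hnl.1, hnl.2, hsp, hz, hb1, hgt, hpi, hle]]
                    rw [ih2 _ i i (-1) hi]
                    congr 1
                    simp [pvSegStepI, hstrip, hz, hb1, hgt, hle]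
                · rw [show pvALoop (c :: cs) (ts, i, pi, ps, true)
                      = pvALoop cs (ts, i, i, ps, false) by
                    simp [pvALoop, hnl.1, hnl.2, hsp, hz, hb1, hgt]]
                  rw [ih2 _ i i ps hi]
                  congr 1
                  simp [pvSegStepI, hstrip, hz, hb1, hgt]
          rw [hupd, hsplit]
          rfl
    · intro ts i pi ps hpi
      by_cases hnl : c = '\n' ∨ c = '\r'
      · rw [show pvALoop (c :: cs) (ts, i, pi, ps, false)
            = pvALoop cs (ts, 0, pi, ps, true) by simp [pvALoop, hnl]]
        rw [show pvSegSplit (c :: cs) = [] :: pvSegSplit cs by simp [pvSegSplit, hnl]]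
        rw [ih1 ts 0 pi ps le_rfl hpi, pvFoldI_zero]
        rfl
      · rw [not_or] at hnl
        rw [show pvALoop (c :: cs) (ts, i, pi, ps, false)
            = pvALoop cs (ts, i, pi, ps, false) by
          simp [pvALoop, hnl.1, hnl.2]]
        rw [ih2 ts i pi ps hpi]
        rw [show pvSegSplit (c :: cs) = (c :: s) :: ss by
          simp [pvSegSplit, hnl.1, hnl.2, hsplit]]
        rw [hsplit]
        rfl

-- ---- the two result scans agree ----

-- first maximum among positive entries of an (index, value) list
def pvFmp : List (Int × Int) → Option (Int × Int)
  | [] => none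
  | (i, s) :: l =>
    match pvFmp l with
    | none => if 0 < s then some (i, s) else none
    | some (p, m) => if 0 < s ∧ m ≤ s then some (i, s) else some (p, m)

-- A's scan fold, carrying the current best value instead of re-reading tabsizes
def pvScan2 (l : List (Int × Int)) (acc : Int × Int) : Int × Int :=
  l.foldl (fun iv p => if p.2 > 0 ∧ (iv.1 = -1 ∨ p.2 > iv.2) then p else iv) acc

lemma pvScan2_fmp (l : List (Int × Int)) (i v : Int) (hv : 0 < v) (hi : 0 ≤ i)
    (hl : ∀ p ∈ l, 0 ≤ p.1) :
    pvScan2 l (i, v) =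
      (match pvFmp l with
       | some (p, m) => if v < m then (p, m) else (i, v)
       | none => (i, v)) := by
  induction l generalizing i v with
  | nil => rfl
  | cons q l ih =>
    obtain ⟨j, s⟩ := q
    have hj : 0 ≤ j := hl (j, s) (by simp)
    have hl' : ∀ p ∈ l, 0 ≤ p.1 := fun p hp => hl p (by simp [hp])
    simp only [pvScan2, List.foldl_cons] at *
    simp only [pvFmp]
    by_cases hs : s > 0 ∧ (i = -1 ∨ s > v)
    · have hsv : v < s := by rcases hs.2 with h | h <;> omega
      rw [if_pos hs, ih j s hs.1 hj hl']
      cases hf : pvFmp l with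
      | none => simp [hs.1, hsv]
      | some pm =>
        obtain ⟨p, m⟩ := pm
        by_cases hm : m ≤ s
        · have h1 : ¬ s < m := by omega
          simp [hs.1, hm, h1, hsv]
        · have hms : s < m := by omega
          have h2 : v < m := by omega
          simp [hs.1, hm, hms, h2]
    · rw [if_neg hs, ih i v hv hi hl']
      have hsv : ¬ (s > 0 ∧ v < s) := fun h => hs ⟨h.1, Or.inr h.2⟩
      cases hf : pvFmp l with
      | none =>
        by_cases h0 : 0 < s
        · have : ¬ v < s := by omega
          simp [h0, this]
        · simp [h0]
      | some pm =>
        obtain ⟨p, m⟩ := pm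
        by_cases hm : 0 < s ∧ m ≤ s
        · have h1 : ¬ v < s := by omega
          have h2 : ¬ v < m := by omega
          simp [hm, h1, h2]
        · simp [hm]

lemma pvScan2_start (l : List (Int × Int)) (v0 : Int) (hl : ∀ p ∈ l, 0 ≤ p.1) :
    pvScan2 l (-1, v0) = (pvFmp l).getD (-1, v0) := by
  cases l with
  | nil => rfl
  | cons q l =>
    obtain ⟨j, s⟩ := q
    have hj : 0 ≤ j := hl (j, s) (by simp)
    have hl' : ∀ p ∈ l, 0 ≤ p.1 := fun p hp => hl p (by simp [hp])
    simp only [pvScan2, List.foldl_cons, pvFmp]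
    by_cases h0 : s > 0
    · rw [if_pos ⟨h0, by simp⟩]
      rw [show (l.foldl (fun iv p => if p.2 > 0 ∧ (iv.1 = -1 ∨ p.2 > iv.2) then p else iv) (j, s)) = pvScan2 l (j, s) from rfl]
      rw [pvScan2_fmp l j s h0 hj hl']
      cases hf : pvFmp l with
      | none => simp [h0]
      | some pm =>
        obtain ⟨p, m⟩ := pm
        by_cases hm : m ≤ s
        · have h1 : ¬ s < m := by omega
          simp [h0, hm, h1]
        · have hms : s < m := by omega
          simp [h0, hm, hms]
    · rw [if_neg (by simp [h0])]
      rw [show (l.foldl (fun iv p => if p.2 > 0 ∧ (iv.1 = -1 ∨ p.2 > iv.2) then p else iv) (-1, v0)) = pvScan2 l (-1, v0) from rfl]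
      rw [pvScan2_start l v0 hl']
      cases hf : pvFmp l with
      | none => simp [h0]
      | some pm =>
        obtain ⟨p, m⟩ := pm
        have : ¬ (0 < s ∧ m ≤ s) := fun h => h0 h.1
        simp [this]

lemma pvAScan_ghost (ts : List Int) :
    pvAScan ts = (pvScan2 (PySem.List.enumerate ts) (-1, 0)).1 := by
  have G : ∀ (l : List (Int × Int)) (idx v : Int),
      (idx = -1 ∨ (PySem.List.pyGet? ts idx).getD 0 = v) →
      (∀ p ∈ l, PySem.List.pyGet? ts p.1 = some p.2) →
      l.foldl (fun index p =>
        if p.2 > 0 ∧ (index = -1 ∨ p.2 > (PySem.List.pyGet? ts index).getD 0) then p.1 else index) idx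
        = (pvScan2 l (idx, v)).1 := by
    intro l
    induction l with
    | nil => intro idx v _ _; rfl
    | cons q l ih =>
      intro idx v hinv hl
      obtain ⟨j, s⟩ := q
      have hj : PySem.List.pyGet? ts j = some s := hl (j, s) (by simp)
      have hl' : ∀ p ∈ l, PySem.List.pyGet? ts p.1 = some p.2 := fun p hp => hl p (by simp [hp])
      simp only [List.foldl_cons, pvScan2]
      have hcond : (s > 0 ∧ (idx = -1 ∨ s > (PySem.List.pyGet? ts idx).getD 0))
          ↔ (s > 0 ∧ (idx = -1 ∨ s > v)) := by
        rcases hinv with h | h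
        · simp [h]
        · rw [h]
      by_cases hc : s > 0 ∧ (idx = -1 ∨ s > v)
      · rw [if_pos (hcond.mpr hc), if_pos hc]
        exact ih j s (Or.inr (by rw [hj]; rfl)) hl'
      · rw [if_neg (fun h => hc (hcond.mp h)), if_neg hc]
        exact ih idx v hinv hl'
  refine G (PySem.List.enumerate ts) (-1) 0 (Or.inl rfl) ?_
  intro p hp
  rw [PySem.List.mem_enumerate_iff] at hp
  obtain ⟨k, hk, rfl⟩ := hp
  simp [PySem.List.pyGet?_natCast, List.getElem?_eq_getElem hk]

lemma pvFoldlMax (l : List Int) (a b : Int) :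
    l.foldl max (max a b) = max a (l.foldl max b) := by
  induction l generalizing b with
  | nil => rfl
  | cons c l ih => simp only [List.foldl_cons, max_assoc, ih]

lemma pvFmp_enumerate (ts : List Int) (k : Int) :
    pvFmp (PySem.List.enumerate ts k) =
      (match PySem.List.max? ts (fun y => y) with
       | some m => if 0 < m then some (k + (((PySem.List.index? ts m).getD 0 : Nat) : Int), m) else none
       | none => none) := by
  induction ts generalizing k with
  | nil => rfl
  | cons x ts ih =>
    rw [show PySem.List.enumerate (x :: ts) k = (k, x) :: PySem.List.enumerate ts (k + 1) from
      PySem.List.enumerate_cons x ts k]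
    simp only [pvFmp, ih (k + 1)]
    rw [PySem.List.max?_id_cons]
    cases ts with
    | nil =>
      simp only [List.foldl_nil]
      have h0 : (PySem.List.max? ([] : List Int) (fun y => y)) = none := by simp [PySem.List.max?]
      have hidx : PySem.List.index? [x] x = some 0 := PySem.List.index?_cons_self x []
      by_cases hx : 0 < x
      · simp [h0, hx]
      · simp [h0, hx]
    | cons y ts' =>
      rw [PySem.List.max?_id_cons]
      have hm' : List.foldl max x (y :: ts') = max x (List.foldl max y ts') := by
        simpa using pvFoldlMax ts' x y
      set m' := List.foldl max y ts' with hm'def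
      have hmem : m' ∈ y :: ts' := by
        rw [hm'def]
        rcases PySem.List.foldl_max_mem ts' y with h | h
        · rw [h]; simp
        · exact List.mem_cons_of_mem y h
      by_cases h0 : 0 < m'
      · -- tail has a positive max m'
        simp only [h0, if_pos]
        by_cases hxs : 0 < x ∧ m' ≤ x
        · -- head wins: overall max is x, first index 0
          have hmx : max x m' = x := by omega
          simp only [hxs, if_pos, hm', hmx]
          simp [List.idxOf?_cons]
        · -- tail wins: x < m' (since m' > 0, either x ≤ 0 or x < m')
          have hxm : x < m' := by
            rcases not_and_or.mp hxs with h | h <;> omega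
          have hmx : max x m' = m' := by omega
          simp only [hxs, if_neg, not_false_iff, hm', hmx, h0, if_pos]
          have hne : x ≠ m' := by omega
          have hsome : (PySem.List.index? (y :: ts') m').isSome := by
            rw [PySem.List.index?_isSome_iff]; exact hmem
          obtain ⟨j, hj⟩ := Option.isSome_iff_exists.mp hsome
          rw [PySem.List.index?_cons_of_ne (y :: ts') hne, hj]
          simp only [Option.map_some, Option.getD_some]
          push_cast
          ring_nf
      · -- tail max not positive
        simp only [h0, if_neg, not_false_iff]
        by_cases hx : 0 < x
        · have hmx : max x m' = x := by omega
          simp [hm', hmx, hx, List.idxOf?_cons]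
        · have hmx : ¬ (0 < max x m') := by omega
          simp [hm', hmx, hx]

lemma pvScan_eq (ts : List Int) : pvAScan ts = pvBScan ts := by
  have hwf : ∀ p ∈ PySem.List.enumerate ts, 0 ≤ p.1 := by
    intro p hp
    rw [PySem.List.mem_enumerate_iff] at hp
    obtain ⟨k, hk, rfl⟩ := hp
    simp
  rw [pvAScan_ghost, pvScan2_start _ _ hwf, pvFmp_enumerate ts 0]
  unfold pvBScan
  cases hm : PySem.List.max? ts (fun y => y) with
  | none => rfl
  | some m =>
    by_cases h0 : 0 < m
    · simp [h0]
    · simp [h0]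

-- ===== VERDICT (by name: the statement is the Claim_ definition above) =====
theorem guessSpacesPerIndent_spec : Claim_equal_guessSpacesPerIndent := by
  intro text _
  unfold Spec_guessSpacesPerIndent guessSpacesPerIndent guessSpacesPerIndent_alt
  have h := (pvQ text.toList).1 (List.replicate 9 0) 0 0 (-1) le_rfl le_rfl
  rw [pvFoldI_zero] at h
  have hts : (pvALoop text.toList (List.replicate 9 0, 0, 0, -1, true)).1
      = ((pvSegSplit text.toList).foldl pvBStep (List.replicate 9 0, 0, -1)).1 :=
    congrArg Prod.fst h
  rw [hts, pvScan_eq]
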